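-- pv_equiv track=rewrite | github.com/jc1775/codewars | numinc.py | num_increasing
-- ===== SOURCE A (Python) =====
-- def num_increasing(numtup):
--     sequence = []
--     for num in numtup:
--         if len(sequence) == 0:
--             sequence.append(num)
--         elif sequence[-1] >= num and len(sequence) == 1:
--             sequence[0] = num
--         elif sequence[-1] < num:
--             sequence.append(num)
--         else:
--             if len(sequence) > 1:
--                 return sequence
--     if len(sequence) > 1:
--         return sequence
-- ===== SOURCE B (Python) =====
-- def num_increasing(numtup):
--     it = iter(numtup)
--     prev = None
--     first = True
--     # phase 1: locate the start of the first strict ascent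
--     for x in it:
--         if not first and prev < x:
--             run = [prev, x]
--             prev = x
--             # phase 2: extend the run while it keeps strictly increasing
--             for y in it:
--                 if prev < y:
--                     run.append(y)
--                     prev = y
--                 else:
--                     break
--             return run
--         prev = x
--         first = False
--     return None
-- ===== Notes on version B (the rewrite author's own statement) =====
-- stated objective: alternative
-- what changed: Replaces A's single state-machine pass that builds/slides/extends a 'sequence' list under four branch cases with an explicit two-phase scan: first locate the start of the first strict ascent, then a separate inner loop extends the run; no sliding single-element list state.
import Mathlib
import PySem

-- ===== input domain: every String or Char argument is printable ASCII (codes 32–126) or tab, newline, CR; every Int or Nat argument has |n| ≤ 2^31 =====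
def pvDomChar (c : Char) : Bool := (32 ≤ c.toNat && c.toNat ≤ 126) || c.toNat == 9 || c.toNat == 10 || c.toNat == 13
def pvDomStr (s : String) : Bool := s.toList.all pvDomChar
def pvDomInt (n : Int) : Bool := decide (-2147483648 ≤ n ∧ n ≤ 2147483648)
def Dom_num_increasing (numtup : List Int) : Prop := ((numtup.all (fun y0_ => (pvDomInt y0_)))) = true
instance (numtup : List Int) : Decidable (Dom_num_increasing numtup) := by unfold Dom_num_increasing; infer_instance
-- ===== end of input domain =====

-- B is an alternative decomposition (locate-ascent-then-extend two-phase scan) of A's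
-- single state-machine pass; same cost, different structure.

-- ===== PORT A =====
-- the for-loop over numtup with mutable `sequence` and the early `return`
def numIncLoopA (seq : List Int) : List Int → Option (List Int)
  | [] => if seq.length > 1 then some seq else none
  | num :: rest =>
    if seq.length = 0 then numIncLoopA (seq ++ [num]) rest
    else if seq.getLastD 0 ≥ num ∧ seq.length = 1 then numIncLoopA [num] rest
    else if seq.getLastD 0 < num then numIncLoopA (seq ++ [num]) rest
    else if seq.length > 1 then some seq
    else numIncLoopA seq rest

def num_increasing (numtup : List Int) : Option (List Int) :=
  numIncLoopA [] numtup

-- ===== PORT B =====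
-- phase 2: extend the run while strictly increasing (returns the extension past `prev`)
def extendRunB (prev : Int) : List Int → List Int
  | [] => []
  | y :: rest => if prev < y then y :: extendRunB y rest else []

-- phase 1: locate the start of the first strict ascent
def findAscentB (prev : Int) : List Int → Option (List Int)
  | [] => none
  | x :: rest =>
    if prev < x then some (prev :: x :: extendRunB x rest)
    else findAscentB x rest

def num_increasing_alt (numtup : List Int) : Option (List Int) :=
  match numtup with
  | [] => none
  | a :: rest => findAscentB a rest

-- ===== PRECONDITION & SPEC =====
def Spec_num_increasing (numtup : List Int) (out : Option (List Int)) : Prop := out = num_increasing_alt numtup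
instance (numtup : List Int) (out : Option (List Int)) : Decidable (Spec_num_increasing numtup out) := by unfold Spec_num_increasing; infer_instance

-- ===== CLAIM (what is proved, stated in full; the proofs are below) =====
def Claim_equal_num_increasing : Prop := ∀ (numtup : List Int), Dom_num_increasing numtup → Spec_num_increasing numtup (num_increasing numtup)

-- ===== LEMMAS AND PROOFS =====

-- once `sequence` has length ≥ 2, A's loop just extends it while strictly increasing
lemma loopA_of_two_le (rest : List Int) : ∀ (seq : List Int), 2 ≤ seq.length →
    numIncLoopA seq rest = some (seq ++ extendRunB (seq.getLastD 0) rest) := by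
  induction rest with
  | nil =>
    intro seq h
    simp [numIncLoopA, extendRunB]
    omega
  | cons num rest ih =>
    intro seq h
    have h0 : ¬ seq.length = 0 := by omega
    have h1 : ¬ (seq.getLastD 0 ≥ num ∧ seq.length = 1) := by
      rintro ⟨-, h1⟩; omega
    rw [numIncLoopA, if_neg h0, if_neg h1]
    by_cases hlt : seq.getLastD 0 < num
    · rw [if_pos hlt, ih (seq ++ [num]) (by simp; omega), List.getLastD_concat]
      simp only [extendRunB]
      rw [if_pos hlt, List.append_assoc]
      simp
    · rw [if_neg hlt, if_pos (show seq.length > 1 by omega)]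
      simp only [extendRunB]
      rw [if_neg hlt, List.append_nil]

-- while `sequence` is a single element [a], A's loop behaves like B's ascent search
lemma loopA_singleton (rest : List Int) : ∀ (a : Int),
    numIncLoopA [a] rest = findAscentB a rest := by
  induction rest with
  | nil => intro a; simp [numIncLoopA, findAscentB]
  | cons num rest ih =>
    intro a
    have hg : (([a] : List Int)).getLastD 0 = a := rfl
    rw [numIncLoopA, findAscentB]
    simp only [hg, List.length_singleton]
    rw [if_neg (by omega : ¬ (1 : ℕ) = 0)]
    by_cases hlt : a < num
    · rw [if_neg (fun hc => absurd hc.1 (not_le.mpr hlt)), if_pos hlt,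
        loopA_of_two_le rest ([a] ++ [num]) (by simp), List.getLastD_concat,
        if_pos hlt]
      simp
    · rw [if_pos ⟨not_lt.mp hlt, trivial⟩, ih num, if_neg hlt]

-- ===== VERDICT (by name: the statement is the Claim_ definition above) =====
theorem num_increasing_spec : Claim_equal_num_increasing := by
  intro numtup _
  unfold Spec_num_increasing num_increasing num_increasing_alt
  cases numtup with
  | nil => simp [numIncLoopA]
  | cons a rest =>
    rw [numIncLoopA]
    simp only [List.length_nil, List.nil_append]
    exact loopA_singleton rest a
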